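-- pv_equiv track=rewrite | github.com/xlateai/xos | transcription.py | committed_sentences_at_none
-- ===== SOURCE A (Python) =====
-- def committed_sentences_at_none(events):
--     """
--     Rust contract: each commit is Some(canonical) immediately followed by None.
--     Return those canonical strings in order (no word-level stitching).
--     """
--     out = []
--     prev = None
--     for e in events:
--         if e is None:
--             if isinstance(prev, str) and prev.strip():
--                 out.append(prev.strip())
--             prev = None
--         else:
--             prev = e
--     return out
-- ===== SOURCE B (Python) =====
-- def committed_sentences_at_none(events):
--     # Stage 1: split the event stream into the segments of strings that are
--     # closed by a None marker (a trailing segment with no closing None is dropped).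
--     def closed_segments(evts):
--         cur = []
--         for e in evts:
--             if e is None:
--                 yield cur
--                 cur = []
--             else:
--                 cur.append(e)
--
--     # Stage 2: each closed segment commits the strip of its last string, if non-blank.
--     out = []
--     for seg in closed_segments(events):
--         if seg:
--             s = seg[-1].strip()
--             if s:
--                 out.append(s)
--     return out
-- ===== Notes on version B (the rewrite author's own statement) =====
-- stated objective: alternative
-- what changed: Replaces A's single-pass prev/reset state machine with a two-stage pipeline: first split the stream into segments closed by a None marker, then commit the stripped last string of each non-empty closed segment.
import Mathlib
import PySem

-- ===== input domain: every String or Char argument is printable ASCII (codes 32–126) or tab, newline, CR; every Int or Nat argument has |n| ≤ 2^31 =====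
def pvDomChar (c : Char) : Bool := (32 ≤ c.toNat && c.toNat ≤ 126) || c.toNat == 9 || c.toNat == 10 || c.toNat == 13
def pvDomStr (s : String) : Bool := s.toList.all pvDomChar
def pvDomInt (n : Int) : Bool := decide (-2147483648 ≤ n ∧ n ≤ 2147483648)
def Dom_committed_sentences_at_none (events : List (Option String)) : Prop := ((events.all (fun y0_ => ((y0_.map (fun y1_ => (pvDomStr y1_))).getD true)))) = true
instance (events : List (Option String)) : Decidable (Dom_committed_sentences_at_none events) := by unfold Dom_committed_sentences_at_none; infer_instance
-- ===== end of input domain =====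

-- B replaces A's prev/reset state machine by a two-stage pipeline: split into segments closed by a None marker, then commit each closed segment's stripped last string; alternative decomposition, same cost.


-- ===== PORT A =====
-- A's loop body: on None, emit prev.strip() if prev is a non-blank string, then reset; else remember e
def pvStepA (st : List String × Option String) (e : Option String) : List String × Option String :=
  match e with
  | none =>
    match st.2 with
    | some p => if PySem.Str.strip p ≠ "" then (st.1 ++ [PySem.Str.strip p], none) else (st.1, none)
    | none => (st.1, none)
  | some s => (st.1, some s)

def committed_sentences_at_none (events : List (Option String)) : List String :=
  (events.foldl pvStepA ([], none)).1

-- ===== PORT B =====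
-- stage 1 of Source B: the segments of strings closed by a None marker (trailing open segment dropped)
def pvClosedSegments : List (Option String) → List String → List (List String)
  | [], _ => []
  | none :: rest, cur => cur :: pvClosedSegments rest []
  | some s :: rest, cur => pvClosedSegments rest (cur ++ [s])

-- stage 2 of Source B: each non-empty closed segment commits the strip of its last string, if non-blank
def pvStepB (out : List String) (seg : List String) : List String :=
  match seg.getLast? with
  | some p => if PySem.Str.strip p ≠ "" then out ++ [PySem.Str.strip p] else out
  | none => out

def committed_sentences_at_none_alt (events : List (Option String)) : List String :=
  (pvClosedSegments events []).foldl pvStepB []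

-- ===== PRECONDITION & SPEC =====
def Spec_committed_sentences_at_none (events : List (Option String)) (out : List String) : Prop := out = committed_sentences_at_none_alt events
instance (events : List (Option String)) (out : List String) : Decidable (Spec_committed_sentences_at_none events out) := by unfold Spec_committed_sentences_at_none; infer_instance

-- ===== CLAIM (what is proved, stated in full; the proofs are below) =====
def Claim_equal_committed_sentences_at_none : Prop := ∀ (events : List (Option String)), Dom_committed_sentences_at_none events → Spec_committed_sentences_at_none events (committed_sentences_at_none events)

-- ===== LEMMAS AND PROOFS =====
-- what one closed segment contributes
def pvEmit (seg : List String) : List String :=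
  match seg.getLast? with
  | some p => if PySem.Str.strip p ≠ "" then [PySem.Str.strip p] else []
  | none => []

theorem stepB_emit (out seg : List String) : pvStepB out seg = out ++ pvEmit seg := by
  unfold pvStepB pvEmit
  match h : seg.getLast? with
  | some p => by_cases hp : PySem.Str.strip p = "" <;> simp [hp]
  | none => simp

theorem stepA_none (out cur : List String) :
    pvStepA (out, cur.getLast?) none = (out ++ pvEmit cur, none) := by
  unfold pvStepA pvEmit
  match h : cur.getLast? with
  | some p => by_cases hp : PySem.Str.strip p = "" <;> simp [hp]
  | none => simp

theorem foldB_eq (segs : List (List String)) : ∀ (acc : List String),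
    segs.foldl pvStepB acc = acc ++ (segs.map pvEmit).flatten := by
  induction segs with
  | nil => intro acc; simp
  | cons seg rest ih =>
    intro acc
    rw [List.foldl_cons, stepB_emit, ih, List.map_cons, List.flatten_cons, List.append_assoc]

-- A's fold, started with prev = last of the currently open segment, emits acc ++ B's emissions
theorem foldA_eq (events : List (Option String)) : ∀ (acc cur : List String),
    (events.foldl pvStepA (acc, cur.getLast?)).1
    = acc ++ ((pvClosedSegments events cur).map pvEmit).flatten := by
  induction events with
  | nil => intro acc cur; simp [pvClosedSegments]
  | cons e rest ih =>
    intro acc cur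
    match e with
    | none =>
      rw [List.foldl_cons, stepA_none]
      have := ih (acc ++ pvEmit cur) ([] : List String)
      simp only [List.getLast?_nil] at this
      rw [this]
      show _ = acc ++ ((cur :: pvClosedSegments rest []).map pvEmit).flatten
      rw [List.map_cons, List.flatten_cons, List.append_assoc]
    | some s =>
      rw [List.foldl_cons]
      have hl : (cur ++ [s]).getLast? = some s := by simp
      have := ih acc (cur ++ [s])
      rw [hl] at this
      show (rest.foldl pvStepA (acc, some s)).1 = acc ++ ((pvClosedSegments rest (cur ++ [s])).map pvEmit).flatten
      exact this

-- ===== VERDICT (by name: the statement is the Claim_ definition above) =====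
theorem committed_sentences_at_none_spec : Claim_equal_committed_sentences_at_none := by
  intro events _
  unfold Spec_committed_sentences_at_none committed_sentences_at_none committed_sentences_at_none_alt
  rw [foldB_eq]
  have := foldA_eq events [] []
  simpa using this
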